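-- pv_equiv track=rewrite | github.com/greenmaid/adventofcode2024 | day12/day12.py | get_perimeter
-- ===== SOURCE A (Python) =====
-- def get_perimeter(area):
--     count = 0
--     for x,y in area:
--         if (x+1,y) not in area:
--             count += 1
--         if (x-1,y) not in area:
--             count += 1
--         if (x,y+1) not in area:
--             count += 1
--         if (x,y-1) not in area:
--             count += 1
--     return count
-- ===== SOURCE B (Python) =====
-- def get_perimeter(area):
--     shared = 0
--     for x, y in area:
--         if (x + 1, y) in area:
--             shared += 1
--         if (x, y + 1) in area:
--             shared += 1
--     return 4 * len(area) - 2 * shared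
-- ===== Notes on version B (the rewrite author's own statement) =====
-- stated objective: alternative
-- what changed: B replaces A's four absent-neighbour tests per cell by the edge-counting identity perimeter = 4*|area| - 2*shared, counting each internal edge once via the two forward neighbours only.
import Mathlib
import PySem

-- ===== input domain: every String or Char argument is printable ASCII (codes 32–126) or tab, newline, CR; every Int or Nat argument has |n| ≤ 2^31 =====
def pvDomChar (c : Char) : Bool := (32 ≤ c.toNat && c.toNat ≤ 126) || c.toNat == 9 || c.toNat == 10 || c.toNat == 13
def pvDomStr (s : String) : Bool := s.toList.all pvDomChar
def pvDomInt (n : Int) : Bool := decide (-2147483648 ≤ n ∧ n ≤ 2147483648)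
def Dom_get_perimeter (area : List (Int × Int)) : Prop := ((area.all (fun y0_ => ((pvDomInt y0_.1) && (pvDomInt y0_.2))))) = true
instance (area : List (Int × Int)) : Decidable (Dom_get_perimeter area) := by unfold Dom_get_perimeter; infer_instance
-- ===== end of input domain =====

-- B computes the perimeter by the edge-counting identity 4*|area| - 2*shared (forward neighbours
-- only) instead of A's four absent-neighbour tests per cell; same cost, different decomposition.

-- ===== PORT A =====
def get_perimeter (area : List (Int × Int)) : Int :=
  area.foldl (fun count p =>
    let count := if (p.1 + 1, p.2) ∈ area then count else count + 1
    let count := if (p.1 - 1, p.2) ∈ area then count else count + 1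
    let count := if (p.1, p.2 + 1) ∈ area then count else count + 1
    if (p.1, p.2 - 1) ∈ area then count else count + 1) 0

-- ===== PORT B =====
def get_perimeter_alt (area : List (Int × Int)) : Int :=
  4 * (area.length : Int) - 2 *
    (area.foldl (fun shared p =>
      let shared := if (p.1 + 1, p.2) ∈ area then shared + 1 else shared
      if (p.1, p.2 + 1) ∈ area then shared + 1 else shared) 0)

-- ===== PRECONDITION & SPEC =====
-- Pre_ excludes lists with duplicate coordinates: `area` stands for a set of cells (the caller
-- builds a Python set), and on duplicates A counts per occurrence while B's 4*len identity does
-- not — a corner no caller specifies.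
def Pre_get_perimeter (area : List (Int × Int)) : Prop := area.Nodup
instance (area : List (Int × Int)) : Decidable (Pre_get_perimeter area) := by unfold Pre_get_perimeter; infer_instance
def pvWitness_get_perimeter : (List (Int × Int)) := [(0, 0), (1, 0), (1, 1)]
def Spec_get_perimeter (area : List (Int × Int)) (out : Int) : Prop := out = get_perimeter_alt area
instance (area : List (Int × Int)) (out : Int) : Decidable (Spec_get_perimeter area out) := by unfold Spec_get_perimeter; infer_instance

-- ===== CLAIM (what is proved, stated in full; the proofs are below) =====
def Claim_equal_get_perimeter : Prop := ∀ (area : List (Int × Int)), Dom_get_perimeter area → Pre_get_perimeter area → Spec_get_perimeter area (get_perimeter area)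

-- ===== LEMMAS AND PROOFS =====

-- indicator of membership, as an integer
def pvInd (s : List (Int × Int)) (p : Int × Int) : Int := if p ∈ s then 1 else 0

lemma pvFoldA (s : List (Int × Int)) :
    ∀ (l : List (Int × Int)) (c : Int),
      List.foldl (fun count p =>
        let count := if (p.1 + 1, p.2) ∈ s then count else count + 1
        let count := if (p.1 - 1, p.2) ∈ s then count else count + 1
        let count := if (p.1, p.2 + 1) ∈ s then count else count + 1
        if (p.1, p.2 - 1) ∈ s then count else count + 1) c l
      = c + (l.map (fun p => 4 - pvInd s (p.1 + 1, p.2) - pvInd s (p.1 - 1, p.2)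
                               - pvInd s (p.1, p.2 + 1) - pvInd s (p.1, p.2 - 1))).sum := by
  intro l
  induction l with
  | nil => simp
  | cons x t ih =>
    intro c
    simp only [List.foldl, List.map, List.sum_cons, ih]
    unfold pvInd
    split_ifs <;> ring

lemma pvFoldB (s : List (Int × Int)) :
    ∀ (l : List (Int × Int)) (c : Int),
      List.foldl (fun shared p =>
        let shared := if (p.1 + 1, p.2) ∈ s then shared + 1 else shared
        if (p.1, p.2 + 1) ∈ s then shared + 1 else shared) c l
      = c + (l.map (fun p => pvInd s (p.1 + 1, p.2) + pvInd s (p.1, p.2 + 1))).sum := by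
  intro l
  induction l with
  | nil => simp
  | cons x t ih =>
    intro c
    simp only [List.foldl, List.map, List.sum_cons, ih]
    unfold pvInd
    split_ifs <;> ring

-- shifting by (a,b) is a bijection between the forward- and backward-adjacent cells of a finite set
lemma pvCard_shift (s : Finset (Int × Int)) (a b : Int) :
    (s.filter (fun p => (p.1 + a, p.2 + b) ∈ s)).card
      = (s.filter (fun p => (p.1 - a, p.2 - b) ∈ s)).card := by
  apply Finset.card_bij' (fun p _ => ((p.1 + a, p.2 + b) : Int × Int))
      (fun q _ => ((q.1 - a, q.2 - b) : Int × Int))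
  · intro p hp
    simp only [Finset.mem_filter] at hp ⊢
    exact ⟨hp.2, by simpa using hp.1⟩
  · intro q hq
    simp only [Finset.mem_filter] at hq ⊢
    exact ⟨hq.2, by simpa using hq.1⟩
  · intro p hp; simp
  · intro q hq; simp

lemma pvSum_shift (l : List (Int × Int)) (a b : Int) :
    ∑ p ∈ l.toFinset, pvInd l (p.1 - a, p.2 - b)
      = ∑ p ∈ l.toFinset, pvInd l (p.1 + a, p.2 + b) := by
  have hind : ∀ q : Int × Int, pvInd l q = (if q ∈ l.toFinset then (1 : Int) else 0) := by
    intro q; unfold pvInd; simp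
  simp only [hind]
  simp only [Finset.sum_boole]
  exact_mod_cast (pvCard_shift l.toFinset a b).symm

lemma pvMap_sum_toFinset (l : List (Int × Int)) (hnd : l.Nodup) (f : Int × Int → Int) :
    (l.map f).sum = ∑ p ∈ l.toFinset, f p :=
  (List.sum_toFinset f hnd).symm

-- ===== VERDICT (by name: the statement is the Claim_ definition above) =====
theorem get_perimeter_spec : Claim_equal_get_perimeter := by
  intro area _ hnd
  unfold Spec_get_perimeter get_perimeter get_perimeter_alt
  rw [pvFoldA area area 0, pvFoldB area area 0, zero_add, zero_add,
    pvMap_sum_toFinset area hnd, pvMap_sum_toFinset area hnd]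
  have h1 := pvSum_shift area 1 0
  have h2 := pvSum_shift area 0 1
  simp only [add_zero, sub_zero] at h1 h2
  have hcard : (area.toFinset.card : Int) = (area.length : Int) := by
    exact_mod_cast List.toFinset_card_of_nodup hnd
  simp only [Finset.sum_sub_distrib, Finset.sum_add_distrib, Finset.sum_const,
    nsmul_eq_mul] at *
  rw [h1, h2, hcard]
  ring
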